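-- pv_equiv track=rewrite | github.com/KDM-LAB/KPE-RM-AAAI-25 | keyphrase_models/kg_one2set/predict.py | discard_subsets
-- ===== SOURCE A (Python) =====
-- def discard_subsets(phrases):  #consider only the superset and remove all subsets
--     subsets_removed = []
--     for i in range(len(phrases)):
--         is_subset = False
--         for j in range(i,len(phrases)):
--             if i != j and set(phrases[i].split()).issubset(set(phrases[j].split())):
--                 is_subset = True
--                 break
--         if not is_subset:
--             subsets_removed.append(phrases[i])
--     return subsets_removed
-- ===== SOURCE B (Python) =====
-- def discard_subsets(phrases):
--     # reverse pass: keep a phrase unless its word-set is a subset of a word-set kept so far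
--     kept = []
--     result = []
--     for p in reversed(phrases):
--         s = set(p.split())
--         if any(s <= k for k in kept):
--             continue
--         kept.append(s)
--         result.insert(0, p)
--     return result
-- ===== Notes on version B (the rewrite author's own statement) =====
-- stated objective: faster
-- what changed: Replaces the quadratic scan over all later phrases (rebuilding each word-set per comparison) with a single reverse pass that builds each word-set once and tests subset only against the maximal (kept) sets so far.
import Mathlib
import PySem

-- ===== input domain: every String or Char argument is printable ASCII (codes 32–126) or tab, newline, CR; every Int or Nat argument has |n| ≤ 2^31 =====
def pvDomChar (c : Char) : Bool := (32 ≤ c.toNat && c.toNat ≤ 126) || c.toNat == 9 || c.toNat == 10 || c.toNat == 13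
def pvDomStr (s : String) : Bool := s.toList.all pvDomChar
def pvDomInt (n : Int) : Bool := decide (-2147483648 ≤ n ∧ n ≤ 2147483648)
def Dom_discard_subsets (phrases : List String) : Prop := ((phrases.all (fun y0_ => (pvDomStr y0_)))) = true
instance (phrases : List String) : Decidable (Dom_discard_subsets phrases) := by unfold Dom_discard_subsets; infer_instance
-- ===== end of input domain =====

-- B replaces A's quadratic look-ahead scan by one reverse pass keeping the word-sets retained so far (objective: faster, constant-factor).

-- ===== PORT A =====
-- set(p.split())
def pvWS (s : String) : PySem.Set String := PySem.Set.ofList (PySem.Str.split₀ s)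

-- the inner 'for j in range(i, len(phrases))' loop with its break flag, as an any
def pvInner (ys : List String) (i : Int) : Bool :=
  (PySem.List.pyRange i (ys.length : Int) 1).any (fun j =>
    decide (i ≠ j) &&
      PySem.Set.issubset (pvWS (PySem.List.pyGetD ys i "")) (pvWS (PySem.List.pyGetD ys j "")))

-- body of the outer loop: append phrases[i] unless is_subset
def pvStepA (ys : List String) (acc : List String) (i : Int) : List String :=
  if pvInner ys i then acc else acc ++ [PySem.List.pyGetD ys i ""]

def discard_subsets (phrases : List String) : List String :=
  (PySem.List.pyRange 0 (phrases.length : Int) 1).foldl (pvStepA phrases) []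

-- ===== PORT B =====
-- body of B's loop over reversed(phrases): state = (kept word-sets, result)
def pvStepB (acc : List (PySem.Set String) × List String) (p : String) :
    List (PySem.Set String) × List String :=
  let s := pvWS p
  if acc.1.any (fun k => PySem.Set.issubset s k) then acc
  else (acc.1 ++ [s], p :: acc.2)

def discard_subsets_alt (phrases : List String) : List String :=
  (phrases.reverse.foldl pvStepB ([], [])).2

-- ===== PRECONDITION & SPEC =====
def Spec_discard_subsets (phrases : List String) (out : List String) : Prop := out = discard_subsets_alt phrases
instance (phrases : List String) (out : List String) : Decidable (Spec_discard_subsets phrases out) := by unfold Spec_discard_subsets; infer_instance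

-- ===== CLAIM (what is proved, stated in full; the proofs are below) =====
def Claim_equal_discard_subsets : Prop := ∀ (phrases : List String), Dom_discard_subsets phrases → Spec_discard_subsets phrases (discard_subsets phrases)

-- ===== LEMMAS AND PROOFS =====

-- structural characterisation of A: keep x unless its word-set is subset of a later phrase's
def dsRec : List String → List String
  | [] => []
  | x :: xs =>
    if xs.any (fun t => PySem.Set.issubset (pvWS x) (pvWS t)) then dsRec xs
    else x :: dsRec xs

-- B's fold, written as a foldr (foldl over the reversed list)
def pvRecB (xs : List String) : List (PySem.Set String) × List String :=
  xs.foldr (fun p acc => pvStepB acc p) ([], [])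

theorem sub_trans {a b c : PySem.Set String}
    (h1 : PySem.Set.issubset a b = true) (h2 : PySem.Set.issubset b c = true) :
    PySem.Set.issubset a c = true := by
  rw [PySem.Set.issubset_iff] at *
  exact fun x hx => h2 x (h1 x hx)

theorem any_congr_mem {α : Type} (l : List α) (p q : α → Bool)
    (h : ∀ x ∈ l, p x = q x) : l.any p = l.any q := by
  induction l with
  | nil => rfl
  | cons x xs ih =>
    simp only [List.any_cons, h x (List.mem_cons_self), ih (fun y hy => h y (List.mem_cons_of_mem _ hy))]

-- the inner loop at index |pre| of pre ++ x :: suf tests exactly the suffix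
theorem inner_eq (pre : List String) (x : String) (suf : List String) :
    pvInner (pre ++ x :: suf) (pre.length : Int) =
      suf.any (fun t => PySem.Set.issubset (pvWS x) (pvWS t)) := by
  unfold pvInner
  have hget : PySem.List.pyGetD (pre ++ x :: suf) (pre.length : Int) "" = x := by
    simp [PySem.List.pyGetD_natCast, List.getD]
  have hlt : (pre.length : Int) < ((pre ++ x :: suf).length : Int) := by
    simp
  rw [PySem.List.pyRange_one_cons hlt, List.any_cons]
  simp only [ne_eq, not_true_eq_false, decide_false, Bool.false_and, Bool.false_or]
  rw [any_congr_mem _ _ (fun j => PySem.Set.issubset (pvWS (PySem.List.pyGetD (pre ++ x :: suf) (pre.length : Int) "")) (pvWS (PySem.List.pyGetD (pre ++ x :: suf) j "")))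
        (by
          intro j hj
          rw [PySem.List.mem_pyRange_one] at hj
          have : ¬ ((pre.length : Int) = j) := by omega
          simp [this])]
  have hmap := PySem.List.map_pyGetD_pyRange (xs := pre ++ x :: suf) (a := (pre.length : Int) + 1) (d := "") (by positivity)
  have hdrop : (pre ++ x :: suf).drop (((pre.length : Int) + 1).toNat) = suf := by
    have h' : (((pre.length : Int)) + 1).toNat = pre.length + 1 := by omega
    rw [h', show pre.length + 1 = (pre ++ [x]).length by simp, show pre ++ x :: suf = (pre ++ [x]) ++ suf by simp]
    exact List.drop_left
  rw [hget]
  rw [hdrop] at hmap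
  have hmap' : (PySem.List.pyRange ((pre.length : Int) + 1) (((pre ++ x :: suf).length : Int)) 1).map (fun j => PySem.List.pyGetD (pre ++ x :: suf) j "") = suf := hmap
  have hany : ((PySem.List.pyRange ((pre.length : Int) + 1) (((pre ++ x :: suf).length : Int)) 1).map (fun j => PySem.List.pyGetD (pre ++ x :: suf) j "")).any (fun t => PySem.Set.issubset (pvWS x) (pvWS t)) = suf.any (fun t => PySem.Set.issubset (pvWS x) (pvWS t)) := by
    rw [hmap']
  rw [List.any_map] at hany
  exact hany

-- outer loop over range(|pre|, |pre ++ suf|) appends dsRec suf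
theorem outer_eq (suf : List String) : ∀ (pre : List String) (acc : List String),
    (PySem.List.pyRange (pre.length : Int) (((pre ++ suf).length : Int)) 1).foldl
      (pvStepA (pre ++ suf)) acc = acc ++ dsRec suf := by
  induction suf with
  | nil =>
    intro pre acc
    rw [PySem.List.pyRange_one_eq_nil (by simp)]
    simp [dsRec]
  | cons x xs ih =>
    intro pre acc
    have hlt : (pre.length : Int) < ((pre ++ x :: xs).length : Int) := by simp
    rw [PySem.List.pyRange_one_cons hlt, List.foldl_cons]
    have hstep : pvStepA (pre ++ x :: xs) acc (pre.length : Int) =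
        if xs.any (fun t => PySem.Set.issubset (pvWS x) (pvWS t)) then acc else acc ++ [x] := by
      unfold pvStepA
      rw [inner_eq]
      have hget : PySem.List.pyGetD (pre ++ x :: xs) (pre.length : Int) "" = x := by
        simp [PySem.List.pyGetD_natCast, List.getD]
      rw [hget]
    have hpre : ((pre.length : Int) + 1) = (((pre ++ [x]).length : Int)) := by simp
    have hlist : pre ++ x :: xs = (pre ++ [x]) ++ xs := by simp
    rw [hstep, hpre, hlist]
    rw [ih (pre ++ [x])]
    by_cases hc : xs.any (fun t => PySem.Set.issubset (pvWS x) (pvWS t)) = true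
    · simp [dsRec, hc]
    · simp only [Bool.not_eq_true] at hc
      simp [dsRec, hc]

theorem a_eq_dsRec (phrases : List String) : discard_subsets phrases = dsRec phrases := by
  have := outer_eq phrases [] []
  simpa [discard_subsets] using this

-- invariant of B's fold: result is dsRec, and kept sets dominate exactly the phrases seen
theorem invB (xs : List String) :
    (∀ s : PySem.Set String,
        (pvRecB xs).1.any (fun k => PySem.Set.issubset s k) =
          xs.any (fun t => PySem.Set.issubset s (pvWS t)))
    ∧ (pvRecB xs).2 = dsRec xs := by
  induction xs with
  | nil => exact ⟨fun s => rfl, rfl⟩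
  | cons x xs ih =>
    obtain ⟨h1, h2⟩ := ih
    have hrec : pvRecB (x :: xs) = pvStepB (pvRecB xs) x := rfl
    by_cases hc : (pvRecB xs).1.any (fun k => PySem.Set.issubset (pvWS x) k) = true
    · have hstep : pvRecB (x :: xs) = pvRecB xs := by
        rw [hrec]; unfold pvStepB; simp [hc]
      have hcond : xs.any (fun t => PySem.Set.issubset (pvWS x) (pvWS t)) = true := by
        rw [← h1]; exact hc
      refine ⟨fun s => ?_, ?_⟩
      · rw [hstep, h1 s, List.any_cons]
        cases hsx : PySem.Set.issubset s (pvWS x) with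
        | false => simp
        | true =>
          simp only [Bool.true_or]
          rw [List.any_eq_true] at hcond ⊢
          obtain ⟨t, ht, hsub⟩ := hcond
          exact ⟨t, ht, sub_trans hsx hsub⟩
      · rw [hstep, h2, dsRec, if_pos hcond]
    · simp only [Bool.not_eq_true] at hc
      have hstep : pvRecB (x :: xs) = ((pvRecB xs).1 ++ [pvWS x], x :: (pvRecB xs).2) := by
        rw [hrec]; unfold pvStepB; simp [hc]
      have hcond : xs.any (fun t => PySem.Set.issubset (pvWS x) (pvWS t)) = false := by
        rw [← h1]; exact hc
      refine ⟨fun s => ?_, ?_⟩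
      · rw [hstep]
        simp only [List.any_append, List.any_cons, List.any_nil, h1 s, Bool.or_false]
        exact Bool.or_comm _ _
      · rw [hstep, h2]
        conv_rhs => rw [dsRec]
        rw [hcond]
        simp

theorem b_eq_dsRec (phrases : List String) : discard_subsets_alt phrases = dsRec phrases := by
  have hfold : phrases.reverse.foldl pvStepB ([], []) = pvRecB phrases := by
    rw [List.foldl_reverse]; rfl
  rw [discard_subsets_alt, hfold]
  exact (invB phrases).2

-- ===== VERDICT (by name: the statement is the Claim_ definition above) =====
theorem discard_subsets_spec : Claim_equal_discard_subsets := by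
  intro phrases _
  unfold Spec_discard_subsets
  rw [a_eq_dsRec, b_eq_dsRec]
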